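-- pv_equiv track=rewrite | github.com/TurakhiaLab/panman | mat-construction/MAT_v5.py | seq2int
-- ===== SOURCE A (Python) =====
-- def char2bin(char):
--     bin = "1111"
--     if ( char == "A"):
--         bin = "0001"
--     elif (char == "C"):
--         bin = "0010"
--     elif (char == "G"):
--         bin = "0100"
--     elif (char == "T"):
--         bin = "1000"
--     elif (char == "R"):
--         bin = "0101"
--     elif (char == "Y"):
--         bin = "1010"
--     elif (char == "S"):
--         bin = "0110"
--     elif (char == "W"):
--         bin = "1001"
--     elif (char == "K"):
--         bin = "1100"
--     elif (char == "M"):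
--         bin = "0011"
--     elif (char == "B"):
--         bin = "1110"
--     elif (char == "D"):
--         bin = "1101"
--     elif (char == "H"):
--         bin = "1011"
--     elif (char == "V"):
--         bin = "0111"
--     else:
--         bin = "1111"
--     return (bin)
--
-- def seq2int( seq ):
--     int_list = list()
--     bin_compact = ""
--     for i in range( len(seq) ):
--         bin = char2bin( seq[i] )
--         bin_compact += bin
--
--         if( len(bin_compact) == 32):
--             dec = int( bin_compact, 2 )
--             bin_compact = ""
--             int_list.append(dec)
--
--         elif ( i == len(seq) - 1):
--             dec = int( bin_compact, 2 )
--             bin_compact = ""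
--             int_list.append(dec)
--
--         else:
--             continue
--     return (int_list)
-- ===== SOURCE B (Python) =====
-- def char2bin(char):
--     bin = "1111"
--     if ( char == "A"):
--         bin = "0001"
--     elif (char == "C"):
--         bin = "0010"
--     elif (char == "G"):
--         bin = "0100"
--     elif (char == "T"):
--         bin = "1000"
--     elif (char == "R"):
--         bin = "0101"
--     elif (char == "Y"):
--         bin = "1010"
--     elif (char == "S"):
--         bin = "0110"
--     elif (char == "W"):
--         bin = "1001"
--     elif (char == "K"):
--         bin = "1100"
--     elif (char == "M"):
--         bin = "0011"
--     elif (char == "B"):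
--         bin = "1110"
--     elif (char == "D"):
--         bin = "1101"
--     elif (char == "H"):
--         bin = "1011"
--     elif (char == "V"):
--         bin = "0111"
--     else:
--         bin = "1111"
--     return (bin)
--
-- def seq2int(seq):
--     int_list = []
--     for i in range(0, len(seq), 8):
--         bits = ''.join(char2bin(c) for c in seq[i:i+8])
--         int_list.append(int(bits, 2))
--     return int_list
-- ===== Notes on version B (the rewrite author's own statement) =====
-- stated objective: simpler
-- what changed: Replaces the stateful accumulate-and-flush loop (growing bit-string, ==32 check, last-index check, continue) with direct fixed-size chunking: iterate over the sequence in steps of 8, build each 8-char chunk's bit-string at once, and convert it; no accumulator or flush branches remain.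
import Mathlib
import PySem

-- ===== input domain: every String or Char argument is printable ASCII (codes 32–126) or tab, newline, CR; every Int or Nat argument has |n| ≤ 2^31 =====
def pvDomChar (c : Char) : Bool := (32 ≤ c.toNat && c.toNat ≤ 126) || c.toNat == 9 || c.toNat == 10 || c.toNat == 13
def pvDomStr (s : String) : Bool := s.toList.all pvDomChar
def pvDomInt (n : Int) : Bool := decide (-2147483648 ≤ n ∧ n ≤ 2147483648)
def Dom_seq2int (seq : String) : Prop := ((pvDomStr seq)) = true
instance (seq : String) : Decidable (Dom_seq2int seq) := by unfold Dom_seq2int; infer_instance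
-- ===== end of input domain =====

-- B replaces A's stateful accumulate-and-flush loop by direct fixed-size chunking in
-- steps of 8 (objective: simpler — no accumulator string, no ==32/last-index/continue branches).

-- ===== PORT A =====
-- Shared helper: char2bin, identical in Source A and Source B.
def char2bin (c : Char) : String :=
  if c = 'A' then "0001"
  else if c = 'C' then "0010"
  else if c = 'G' then "0100"
  else if c = 'T' then "1000"
  else if c = 'R' then "0101"
  else if c = 'Y' then "1010"
  else if c = 'S' then "0110"
  else if c = 'W' then "1001"
  else if c = 'K' then "1100"
  else if c = 'M' then "0011"
  else if c = 'B' then "1110"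
  else if c = 'D' then "1101"
  else if c = 'H' then "1011"
  else if c = 'V' then "0111"
  else "1111"

-- int(s, 2): exact for the strings both programs pass to it, which consist only of '0'/'1'
-- (every char2bin output does) and are nonempty at every call site.
def binVal (s : List Char) : Int :=
  s.foldl (fun a c => 2 * a + (if c = '1' then 1 else 0)) 0

-- A's loop: state = (accumulated bit chars bc, result list il); the Python index test
-- `i == len(seq)-1` is `rest = []` on the remaining suffix. Strings are handled via toList.
def seq2intA : List Char → List Char → List Int → List Int
  | [], _, il => il
  | c :: rest, bc, il =>
    if (bc ++ (char2bin c).toList).length = 32 then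
      seq2intA rest [] (il ++ [binVal (bc ++ (char2bin c).toList)])
    else if rest = [] then
      seq2intA rest [] (il ++ [binVal (bc ++ (char2bin c).toList)])
    else seq2intA rest (bc ++ (char2bin c).toList) il

def seq2int (seq : String) : List Int := seq2intA seq.toList [] []

-- ===== PORT B =====
-- Source B: for i in range(0, len(seq), 8): append int(''.join(char2bin(c) for c in seq[i:i+8]), 2)
-- ''.join over the chunk is the flatMap of the 4-bit strings (as char lists).
def seq2int_alt (seq : String) : List Int :=
  let l := seq.toList
  (PySem.List.pyRange 0 (l.length : Int) 8).foldl
    (fun il i =>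
      il ++ [binVal ((PySem.List.slice l (some i) (some (i + 8))).flatMap
              (fun c => (char2bin c).toList))])
    []

-- ===== PRECONDITION & SPEC =====
def Spec_seq2int (seq : String) (out : List Int) : Prop := out = seq2int_alt seq
instance (seq : String) (out : List Int) : Decidable (Spec_seq2int seq out) := by unfold Spec_seq2int; infer_instance

-- ===== CLAIM (what is proved, stated in full; the proofs are below) =====
def Claim_equal_seq2int : Prop := ∀ (seq : String), Dom_seq2int seq → Spec_seq2int seq (seq2int seq)

-- ===== LEMMAS AND PROOFS =====

-- the bit string of a char list
def bits (l : List Char) : List Char := l.flatMap (fun c => (char2bin c).toList)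

-- reference form: the input split into chunks of 8, each converted
def chunksB : List Char → List Int
  | [] => []
  | c :: rest => binVal (bits ((c :: rest).take 8)) :: chunksB (rest.drop 7)
  termination_by l => l.length
  decreasing_by simp

theorem chunksB_nil : chunksB [] = [] := by unfold chunksB; rfl

theorem chunksB_cons (c : Char) (rest : List Char) :
    chunksB (c :: rest) = binVal (bits ((c :: rest).take 8)) :: chunksB (rest.drop 7) := by
  conv_lhs => unfold chunksB

theorem char2bin_len (c : Char) : (char2bin c).toList.length = 4 := by
  simp only [char2bin, apply_ite (fun s : String => s.toList.length),
    show ("0001" : String).toList.length = 4 from rfl,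
    show ("0010" : String).toList.length = 4 from rfl,
    show ("0100" : String).toList.length = 4 from rfl,
    show ("1000" : String).toList.length = 4 from rfl,
    show ("0101" : String).toList.length = 4 from rfl,
    show ("1010" : String).toList.length = 4 from rfl,
    show ("0110" : String).toList.length = 4 from rfl,
    show ("1001" : String).toList.length = 4 from rfl,
    show ("1100" : String).toList.length = 4 from rfl,
    show ("0011" : String).toList.length = 4 from rfl,
    show ("1110" : String).toList.length = 4 from rfl,
    show ("1101" : String).toList.length = 4 from rfl,
    show ("1011" : String).toList.length = 4 from rfl,
    show ("0111" : String).toList.length = 4 from rfl,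
    show ("1111" : String).toList.length = 4 from rfl,
    ite_self]

theorem bits_len (l : List Char) : (bits l).length = 4 * l.length := by
  induction l with
  | nil => rfl
  | cons c t ih =>
    simp only [bits, List.flatMap_cons, List.length_append, List.length_cons, char2bin_len]
    simp only [bits] at ih
    omega

theorem bits_append (p q : List Char) : bits (p ++ q) = bits p ++ bits q := by
  simp [bits]

theorem bits_singleton (c : Char) : bits [c] = (char2bin c).toList := by
  simp [bits]

theorem chunksB_short (l : List Char) (hne : l ≠ []) (hle : l.length ≤ 8) :
    chunksB l = [binVal (bits l)] := by
  match l, hne with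
  | c :: rest, _ =>
    rw [chunksB_cons]
    have h7 : rest.length ≤ 7 := by simp at hle; omega
    rw [List.take_of_length_le (by simpa using hle), List.drop_of_length_le h7, chunksB_nil]

theorem chunksB_eight (x r : List Char) (hx : x.length = 8) :
    chunksB (x ++ r) = binVal (bits x) :: chunksB r := by
  match x, hx with
  | c :: x', hx =>
    have h7 : x'.length = 7 := by simpa using hx
    rw [List.cons_append, chunksB_cons]
    have h1 : (c :: (x' ++ r)).take 8 = c :: x' := by
      show List.take (7 + 1) (c :: (x' ++ r)) = c :: x'
      rw [List.take_succ_cons, List.take_append, h7, Nat.sub_self, List.take_zero,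
          List.append_nil, List.take_of_length_le (le_of_eq h7)]
    have h2 : (x' ++ r).drop 7 = r := by
      rw [List.drop_append, h7, Nat.sub_self, List.drop_zero,
          List.drop_of_length_le (le_of_eq h7), List.nil_append]
    rw [h1, h2]

-- A's loop, run with an accumulator holding the bits of a partial chunk p (|p| < 8),
-- produces exactly the chunked conversion of p ++ l.
theorem seq2intA_eq_chunksB : ∀ (l p : List Char) (il : List Int),
    l ≠ [] → p.length < 8 → seq2intA l (bits p) il = il ++ chunksB (p ++ l) := by
  intro l
  induction l with
  | nil => intro p il h _; exact absurd rfl h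
  | cons c rest ih =>
    intro p il _ hp
    have hbc : bits p ++ (char2bin c).toList = bits (p ++ [c]) := by
      rw [bits_append, bits_singleton]
    have hlen : (bits p ++ (char2bin c).toList).length = 4 * p.length + 4 := by
      rw [List.length_append, bits_len, char2bin_len]
    by_cases h7 : p.length = 7
    · -- full chunk: flush
      have h8 : (p ++ [c]).length = 8 := by simp [h7]
      rw [seq2intA, if_pos (by rw [hlen, h7]), hbc]
      have hsplit : p ++ c :: rest = (p ++ [c]) ++ rest := by simp
      rw [hsplit, chunksB_eight _ _ h8]
      by_cases hr : rest = []
      · subst hr; rw [seq2intA, chunksB_nil]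
      · have hb0 : ([] : List Char) = bits [] := rfl
        rw [hb0, ih [] _ hr (by norm_num)]
        simp
    · have hne32 : ¬ (bits p ++ (char2bin c).toList).length = 32 := by omega
      rw [seq2intA, if_neg hne32]
      by_cases hr : rest = []
      · subst hr
        rw [if_pos rfl, seq2intA, hbc]
        rw [chunksB_short (p ++ [c]) (by simp) (by simp; omega)]
      · rw [if_neg hr, hbc, ih (p ++ [c]) il hr (by simp; omega)]
        simp

-- pyRange with step 8: nil, cons, and shift forms
theorem pyRange8_nil (a b : Int) (h : b ≤ a) : PySem.List.pyRange a b 8 = [] := by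
  rw [PySem.List.pyRange_of_pos a b (by norm_num)]
  rw [if_neg (by omega)]; rfl

theorem pyRange8_cons (a b : Int) (h : a < b) :
    PySem.List.pyRange a b 8 = a :: PySem.List.pyRange (a + 8) b 8 := by
  rw [PySem.List.pyRange_of_pos a b (by norm_num),
      PySem.List.pyRange_of_pos (a + 8) b (by norm_num)]
  have hcount : (if a < b then ((b - a + 8 - 1) / 8).toNat else 0)
      = (if a + 8 < b then ((b - (a + 8) + 8 - 1) / 8).toNat else 0) + 1 := by
    rw [if_pos h]
    by_cases h8 : a + 8 < b
    · rw [if_pos h8]; omega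
    · rw [if_neg h8]; omega
  rw [hcount, List.range_succ_eq_map]
  simp only [List.map_cons, List.map_map, Nat.cast_zero, mul_zero, add_zero]
  congr 1
  apply List.map_congr_left
  intro k _
  simp only [Function.comp_apply, Nat.succ_eq_add_one]
  push_cast
  ring

theorem pyRange8_shift (b : Int) :
    PySem.List.pyRange 8 b 8 = (PySem.List.pyRange 0 (b - 8) 8).map (fun x => x + 8) := by
  rw [PySem.List.pyRange_of_pos 8 b (by norm_num),
      PySem.List.pyRange_of_pos 0 (b - 8) (by norm_num)]
  have hcount : (if 8 < b then ((b - 8 + 8 - 1) / 8).toNat else 0)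
      = (if 0 < b - 8 then ((b - 8 - 0 + 8 - 1) / 8).toNat else 0) := by
    by_cases h : 8 < b
    · rw [if_pos h, if_pos (by omega)]
      omega
    · rw [if_neg h, if_neg (by omega)]
  rw [hcount, List.map_map]
  apply List.map_congr_left
  intro k _
  simp only [Function.comp_apply]
  ring

-- B's chunk at index i (0 ≤ i) as drop/take
theorem slice_chunk (l : List Char) (i : Int) (hi : 0 ≤ i) :
    PySem.List.slice l (some i) (some (i + 8)) = (l.drop i.toNat).take 8 := by
  rw [PySem.List.slice_toNat l hi (by omega)]
  congr 1
  omega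

-- B's map form equals the chunked conversion
theorem alt_map_eq_chunksB : ∀ (n : Nat) (l : List Char), l.length = n →
    (PySem.List.pyRange 0 (l.length : Int) 8).map
      (fun i => binVal ((PySem.List.slice l (some i) (some (i + 8))).flatMap
                (fun c => (char2bin c).toList))) = chunksB l := by
  intro n
  induction n using Nat.strong_induction_on with
  | _ n ih =>
    intro l hl
    match l with
    | [] => rw [chunksB_nil]; simp [pyRange8_nil 0 0 (by norm_num)]
    | c :: t =>
      have hpos : (0 : Int) < ((c :: t).length : Int) := by simp
      rw [pyRange8_cons 0 _ hpos, List.map_cons,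
          show (0 : Int) + 8 = 8 by norm_num, pyRange8_shift, List.map_map]
      have hhead : binVal ((PySem.List.slice (c :: t) (some (0 : Int)) (some (8 : Int))).flatMap
          (fun c => (char2bin c).toList)) = binVal (bits ((c :: t).take 8)) := by
        rw [PySem.List.slice_toNat _ (by norm_num) (by norm_num)]
        simp only [show ((8 : Int)).toNat = 8 from rfl, show ((0 : Int)).toNat = 0 from rfl,
          Nat.sub_zero, List.drop_zero]
        rfl
      rw [hhead]
      by_cases h8 : (c :: t).length ≤ 8
      · rw [pyRange8_nil 0 _ (by omega)]
        rw [List.take_of_length_le h8, chunksB_short _ (by simp) h8]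
        rfl
      · simp only [List.length_cons] at h8 hl
        have hdl : ((c :: t).drop 8).length = t.length + 1 - 8 := by simp
        have hrange : (((c :: t).length : Nat) : Int) - 8 = (((c :: t).drop 8).length : Int) := by
          rw [hdl]; simp only [List.length_cons]; omega
        have htail : (PySem.List.pyRange 0 (((c :: t).length : Int) - 8) 8).map
            ((fun i => binVal ((PySem.List.slice (c :: t) (some i) (some (i + 8))).flatMap
              (fun c => (char2bin c).toList))) ∘ (fun x => x + 8)) = chunksB ((c :: t).drop 8) := by
          rw [hrange, ← ih (((c :: t).drop 8).length) (by rw [hdl]; omega) ((c :: t).drop 8) rfl]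
          apply List.map_congr_left
          intro i hi
          have hi0 : 0 ≤ i := ((PySem.List.mem_pyRange_iff_of_pos (by norm_num) i).1 hi).1
          simp only [Function.comp_apply]
          rw [slice_chunk _ (i + 8) (by omega), slice_chunk _ i hi0, List.drop_drop,
              show (i + 8).toNat = 8 + i.toNat by omega]
        rw [htail]
        have hsplit : c :: t = (c :: t).take 8 ++ (c :: t).drop 8 := by simp
        conv_rhs => rw [hsplit]
        rw [chunksB_eight _ _ (by simp only [List.length_take, List.length_cons]; omega)]

-- ===== VERDICT (by name: the statement is the Claim_ definition above) =====
theorem seq2int_spec : Claim_equal_seq2int := by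
  intro seq _
  unfold Spec_seq2int seq2int seq2int_alt
  rw [PySem.List.foldl_append_singleton_eq_map, List.nil_append,
      alt_map_eq_chunksB seq.toList.length seq.toList rfl]
  match h : seq.toList with
  | [] => rw [seq2intA, chunksB_nil]
  | c :: t =>
    have hb0 : ([] : List Char) = bits [] := rfl
    rw [hb0, seq2intA_eq_chunksB (c :: t) [] [] (by simp) (by norm_num)]
    simp
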